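-- pv_equiv track=rewrite | github.com/russel-zaman/EDA-Project | EDA_summerProject_WS17_18.py | buildCNF_Netlist2
-- ===== SOURCE A (Python) =====
-- def buildCNF_Netlist2(booleanGates,uniqueValue):
--     cnf_net2 = []
--     for bits in booleanGates:
--         ports = bits[1]
--         # for second Netlist counting the net numbers of the gates will be started after the total netCounts of the first Netlist
--         ports = [x+uniqueValue for x in ports]
--         if bits[0] == 'and':
--             # building the arrays of Literals for AND, OR, INV & XOR gate respectively for netlist2 same as first
--             cnf_net2.append([ports[0],-ports[2]])
--             cnf_net2.append([ports[1],-ports[2]])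
--             cnf_net2.append([-ports[0],-ports[1],ports[2]])
--         elif bits[0] == 'or':
--             cnf_net2.append([-ports[0],ports[2]])
--             cnf_net2.append([-ports[1],ports[2]])
--             cnf_net2.append([ports[0],ports[1],-ports[2]])
--         elif bits[0] == 'inv':
--             cnf_net2.append([-ports[0], -ports[1]])
--             cnf_net2.append([ports[0],ports[1]])
--         elif bits[0] == 'xor':
--             cnf_net2.append([-ports[0],-ports[1],-ports[2]])
--             cnf_net2.append([-ports[0],ports[1],ports[2]])
--             cnf_net2.append([ports[0],-ports[1],ports[2]])
--             cnf_net2.append([ports[0],ports[1],-ports[2]])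
--         else:
--             print ("Invalid Gates !!!")
--     return cnf_net2
-- ===== SOURCE B (Python) =====
-- # Generative rewrite: AND clauses are built from the Tseitin implication pattern, OR is derived
-- # as the De Morgan dual of AND (negate every literal), and INV/XOR clauses are generated by
-- # enumerating sign vectors of the forbidden parity instead of hardcoding them.
-- def buildCNF_Netlist2(booleanGates, uniqueValue):
--     cnf = []
--     for name, raw in booleanGates:
--         p = [x + uniqueValue for x in raw]
--         if name in ('and', 'or'):
--             # Tseitin clauses for c = a AND b; OR is the dual gate: same clauses, all literals negated.
--             clauses = [[p[0], -p[2]], [p[1], -p[2]], [-p[0], -p[1], p[2]]]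
--             if name == 'or':
--                 clauses = [[-lit for lit in c] for c in clauses]
--         elif name in ('inv', 'xor'):
--             # parity gates: one clause per sign vector whose product is the forbidden parity
--             n, parity = (2, 1) if name == 'inv' else (3, -1)
--             clauses = []
--             for m in range(1 << n):
--                 signs = [1 if (m >> (n - 1 - k)) & 1 else -1 for k in range(n)]
--                 prod = 1
--                 for s in signs:
--                     prod *= s
--                 if prod == parity:
--                     clauses.append([s * lit for s, lit in zip(signs, p)])
--         else:
--             print("Invalid Gates !!!")
--             continue
--         cnf.extend(clauses)
--     return cnf
-- ===== Notes on version B (the rewrite author's own statement) =====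
-- stated objective: alternative
-- what changed: Instead of hardcoding all twelve clause lists, B generates them: AND from the Tseitin implication pattern, OR as the De Morgan dual of AND (negate every literal), and INV/XOR by enumerating sign vectors whose product equals the gate's forbidden parity.
import Mathlib
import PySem

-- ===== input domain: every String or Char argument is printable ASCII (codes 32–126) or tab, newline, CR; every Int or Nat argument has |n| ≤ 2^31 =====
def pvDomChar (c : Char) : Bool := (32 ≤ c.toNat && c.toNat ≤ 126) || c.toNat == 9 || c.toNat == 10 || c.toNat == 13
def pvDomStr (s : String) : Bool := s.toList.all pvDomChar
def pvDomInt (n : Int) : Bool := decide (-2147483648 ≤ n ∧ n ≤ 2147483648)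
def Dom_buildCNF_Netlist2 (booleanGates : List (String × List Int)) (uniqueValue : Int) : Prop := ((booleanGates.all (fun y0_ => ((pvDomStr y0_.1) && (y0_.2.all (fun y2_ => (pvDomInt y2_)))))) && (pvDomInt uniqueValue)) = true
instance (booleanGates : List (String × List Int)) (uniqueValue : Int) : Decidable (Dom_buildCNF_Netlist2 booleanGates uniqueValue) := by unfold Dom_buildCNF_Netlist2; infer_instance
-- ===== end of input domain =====

-- B generates the clauses instead of hardcoding them: AND from the Tseitin pattern, OR as the
-- De Morgan dual of AND, INV/XOR by enumerating forbidden-parity sign vectors (objective: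
-- alternative; same cost). Equality of RETURN values only: both versions print
-- "Invalid Gates !!!" on unknown gate names (a side effect not modelled here).

-- ===== PORT A =====
def pvStepA (uniqueValue : Int) (cnf_net2 : List (List Int)) (bits : String × List Int) : List (List Int) :=
    let ports := bits.2.map (fun x => x + uniqueValue)
    let g : Int → Int := fun i => PySem.List.pyGetD ports i 0   -- ports[i]; Pre_ keeps i in range
    if bits.1 == "and" then
      cnf_net2 ++ [[g 0, -(g 2)], [g 1, -(g 2)], [-(g 0), -(g 1), g 2]]
    else if bits.1 == "or" then
      cnf_net2 ++ [[-(g 0), g 2], [-(g 1), g 2], [g 0, g 1, -(g 2)]]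
    else if bits.1 == "inv" then
      cnf_net2 ++ [[-(g 0), -(g 1)], [g 0, g 1]]
    else if bits.1 == "xor" then
      cnf_net2 ++ [[-(g 0), -(g 1), -(g 2)], [-(g 0), g 1, g 2], [g 0, -(g 1), g 2], [g 0, g 1, -(g 2)]]
    else cnf_net2  -- else: print only

def buildCNF_Netlist2 (booleanGates : List (String × List Int)) (uniqueValue : Int) : List (List Int) :=
  booleanGates.foldl (pvStepA uniqueValue) []

-- ===== PORT B =====
-- sign vector of m over n bits, most significant bit first (bit 1 → +1, bit 0 → −1)
def pvSigns (n m : Nat) : List Int :=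
  (List.range n).map (fun k => if (m >>> (n - 1 - k)) &&& 1 = 1 then (1 : Int) else -1)

def pvStepB (uniqueValue : Int) (cnf : List (List Int)) (bits : String × List Int) : List (List Int) :=
    let p := bits.2.map (fun x => x + uniqueValue)
    let g : Int → Int := fun i => PySem.List.pyGetD p i 0   -- p[i]; Pre_ keeps i in range
    if bits.1 == "and" || bits.1 == "or" then
      let clauses := [[g 0, -(g 2)], [g 1, -(g 2)], [-(g 0), -(g 1), g 2]]
      let clauses := if bits.1 == "or" then clauses.map (fun c => c.map (fun lit => -lit)) else clauses
      cnf ++ clauses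
    else if bits.1 == "inv" || bits.1 == "xor" then
      let n : Nat := if bits.1 == "inv" then 2 else 3
      let parity : Int := if bits.1 == "inv" then 1 else -1
      -- range(1 << n) over nonnegative m; Python's >> and & on nonnegative ints = Nat >>> / &&&
      let clauses := (List.range (2 ^ n)).foldl (fun acc m =>
        let signs := pvSigns n m
        let prod := signs.foldl (fun a s => a * s) 1
        if prod = parity then acc ++ [(signs.zip p).map (fun sl => sl.1 * sl.2)] else acc) []
      cnf ++ clauses
    else cnf  -- print only

def buildCNF_Netlist2_alt (booleanGates : List (String × List Int)) (uniqueValue : Int) : List (List Int) :=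
  booleanGates.foldl (pvStepB uniqueValue) []

-- ===== PRECONDITION & SPEC =====
-- Pre_ excludes gate entries whose port list is too short for the gate's clauses
-- (A raises IndexError there).
def Pre_buildCNF_Netlist2 (booleanGates : List (String × List Int)) (uniqueValue : Int) : Prop :=
  ∀ b ∈ booleanGates,
    ((b.1 = "and" ∨ b.1 = "or" ∨ b.1 = "xor") → 3 ≤ b.2.length) ∧
    (b.1 = "inv" → 2 ≤ b.2.length)
instance (booleanGates : List (String × List Int)) (uniqueValue : Int) : Decidable (Pre_buildCNF_Netlist2 booleanGates uniqueValue) := by unfold Pre_buildCNF_Netlist2; infer_instance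

def pvWitness_buildCNF_Netlist2 : (List (String × List Int)) × Int :=
  ([("and", [1, 2, 3]), ("inv", [4, 5]), ("foo", [9])], 10)

def Spec_buildCNF_Netlist2 (booleanGates : List (String × List Int)) (uniqueValue : Int) (out : List (List Int)) : Prop := out = buildCNF_Netlist2_alt booleanGates uniqueValue
instance (booleanGates : List (String × List Int)) (uniqueValue : Int) (out : List (List Int)) : Decidable (Spec_buildCNF_Netlist2 booleanGates uniqueValue out) := by unfold Spec_buildCNF_Netlist2; infer_instance

-- ===== CLAIM (what is proved, stated in full; the proofs are below) =====
def Claim_equal_buildCNF_Netlist2 : Prop := ∀ (booleanGates : List (String × List Int)) (uniqueValue : Int), Dom_buildCNF_Netlist2 booleanGates uniqueValue → Pre_buildCNF_Netlist2 booleanGates uniqueValue → Spec_buildCNF_Netlist2 booleanGates uniqueValue (buildCNF_Netlist2 booleanGates uniqueValue)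

-- ===== LEMMAS AND PROOFS =====

theorem pv_nn1 (n : Nat) : (0 : Int) ≤ (n : Int) + 1 := by positivity
theorem pv_nn2 (n : Nat) : (0 : Int) ≤ (n : Int) + 1 + 1 := by positivity
theorem pv_ge2 (n : Nat) : (2 : Int) ≤ (n : Int) + 1 + 1 := by omega

-- The two loop bodies agree on every gate entry admitted by Pre_'s per-entry condition.
theorem pv_step_eq (uniqueValue : Int) (cnf : List (List Int)) (bits : String × List Int)
    (h3 : (bits.1 = "and" ∨ bits.1 = "or" ∨ bits.1 = "xor") → 3 ≤ bits.2.length)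
    (h2 : bits.1 = "inv" → 2 ≤ bits.2.length) :
    pvStepA uniqueValue cnf bits = pvStepB uniqueValue cnf bits := by
  obtain ⟨name, ports⟩ := bits
  by_cases hand : name = "and"
  · obtain ⟨a, b, c, t, hp⟩ : ∃ a b c t, ports = a :: b :: c :: t := by
      have := h3 (Or.inl hand)
      match ports with
      | a :: b :: c :: t => exact ⟨a, b, c, t, rfl⟩
    subst hand; subst hp
    simp [pvStepA, pvStepB, pvSigns, List.range_succ, PySem.List.pyGetD_ofNat',
      PySem.List.pyGetD, pv_nn1, pv_nn2, pv_ge2]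
  · by_cases hor : name = "or"
    · obtain ⟨a, b, c, t, hp⟩ : ∃ a b c t, ports = a :: b :: c :: t := by
        have := h3 (Or.inr (Or.inl hor))
        match ports with
        | a :: b :: c :: t => exact ⟨a, b, c, t, rfl⟩
      subst hor; subst hp
      simp [pvStepA, pvStepB, pvSigns, List.range_succ, PySem.List.pyGetD_ofNat',
        PySem.List.pyGetD, pv_nn1, pv_nn2, pv_ge2]
    · by_cases hinv : name = "inv"
      · obtain ⟨a, b, t, hp⟩ : ∃ a b t, ports = a :: b :: t := by
          have := h2 hinv
          match ports with
          | a :: b :: t => exact ⟨a, b, t, rfl⟩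
        subst hinv; subst hp
        simp [pvStepA, pvStepB, pvSigns, List.range_succ, PySem.List.pyGetD_ofNat',
          PySem.List.pyGetD, pv_nn1, pv_nn2, pv_ge2]
      · by_cases hxor : name = "xor"
        · obtain ⟨a, b, c, t, hp⟩ : ∃ a b c t, ports = a :: b :: c :: t := by
            have := h3 (Or.inr (Or.inr hxor))
            match ports with
            | a :: b :: c :: t => exact ⟨a, b, c, t, rfl⟩
          subst hxor; subst hp
          simp [pvStepA, pvStepB, pvSigns, List.range_succ, PySem.List.pyGetD_ofNat',
            PySem.List.pyGetD, pv_nn1, pv_nn2, pv_ge2]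
        · simp [pvStepA, pvStepB, hand, hor, hinv, hxor]

theorem pv_foldl_acc (booleanGates : List (String × List Int)) (uniqueValue : Int)
    (hpre : Pre_buildCNF_Netlist2 booleanGates uniqueValue)
    (acc : List (List Int)) :
    booleanGates.foldl (pvStepA uniqueValue) acc = booleanGates.foldl (pvStepB uniqueValue) acc := by
  induction booleanGates generalizing acc with
  | nil => rfl
  | cons b t ih =>
    have hb := hpre b (List.mem_cons_self)
    have ht : Pre_buildCNF_Netlist2 t uniqueValue := fun x hx => hpre x (List.mem_cons_of_mem _ hx)
    simp only [List.foldl_cons, pv_step_eq uniqueValue acc b hb.1 hb.2]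
    exact ih ht _

-- ===== VERDICT (by name: the statement is the Claim_ definition above) =====
theorem buildCNF_Netlist2_spec : Claim_equal_buildCNF_Netlist2 := by
  intro gs u _ hpre
  exact pv_foldl_acc gs u hpre []
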